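-- pv_equiv track=rewrite | github.com/AuReMe/padmet | padmet/utils/sbmlPlugin.py | convert_to_coded_id
-- ===== SOURCE A (Python) =====
-- def convert_to_coded_id(uncoded, _type=None, compart=None):
--     """
--     convert an id to sbml valid format. First add type of id "R" for reaction
--     "M" for compound at the start and the compart at the end.
--     _type+"_"+uncoded+"_"+compart
--     then replace not allowed char by integer ordinal
--     Parameters
--     ----------
--     uncoded: str
--         the original id to code
--     _type: str
--         the type of the id (ex: 'R' or 'M')
--     compart: str
--         the compartment of the id (ex: 'c' or 'e')
--
--     Returns
--     -------
--     str:
--         the coded id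
--     """
--     # add type and compart
--     if _type is not None:
--         uncoded = _type + "_" + uncoded
--     if compart is not None:
--         uncoded += "_" + compart
--     # char list that are not allowed in a sbml id
--     charlist = [
--         "-",
--         "|",
--         "/",
--         "(",
--         ")",
--         "'",
--         "=",
--         "#",
--         "*",
--         ".",
--         ":",
--         "!",
--         "+",
--         "[",
--         "]",
--         ",",
--         " ",
--     ]
--     for char in charlist:
--         # if a banned char in the uncoded id, convert it using the integer ordinal
--         uncoded = uncoded.replace(char, "__" + str(ord(char)) + "__")
--
--     return uncoded
-- ===== SOURCE B (Python) =====
-- def convert_to_coded_id(uncoded, _type=None, compart=None):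
--     if _type is not None:
--         uncoded = _type + "_" + uncoded
--     if compart is not None:
--         uncoded += "_" + compart
--     banned = set("-|/()'=#*.:!+[], ")
--     return "".join("__" + str(ord(c)) + "__" if c in banned else c for c in uncoded)
-- ===== Notes on version B (the rewrite author's own statement) =====
-- stated objective: simpler
-- what changed: Replaces the 17 sequential whole-string str.replace passes with a single character-by-character pass that encodes a char iff it lies in a banned-character set, joining the pieces once.
import Mathlib
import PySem

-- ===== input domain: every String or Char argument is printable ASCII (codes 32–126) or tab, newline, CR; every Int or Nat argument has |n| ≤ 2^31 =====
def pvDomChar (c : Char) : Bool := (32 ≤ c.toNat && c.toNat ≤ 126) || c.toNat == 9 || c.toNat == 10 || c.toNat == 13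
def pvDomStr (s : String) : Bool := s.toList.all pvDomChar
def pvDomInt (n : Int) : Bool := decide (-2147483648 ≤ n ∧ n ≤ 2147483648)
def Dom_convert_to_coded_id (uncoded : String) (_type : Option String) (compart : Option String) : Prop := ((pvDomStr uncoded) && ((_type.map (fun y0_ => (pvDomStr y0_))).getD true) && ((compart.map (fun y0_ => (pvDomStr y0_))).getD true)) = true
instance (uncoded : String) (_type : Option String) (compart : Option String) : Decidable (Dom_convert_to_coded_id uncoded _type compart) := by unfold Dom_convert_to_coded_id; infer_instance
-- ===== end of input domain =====

-- B replaces A's 17 sequential whole-string str.replace passes by one character-by-character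
-- pass over the string with a banned-character set (objective: simpler; same return value).

-- shared constant: the encoding "__" + str(ord(c)) + "__" both Pythons build for a banned char
def pvEnc (c : Char) : String := "__" ++ PySem.Int.toStr (Int.ofNat c.toNat) ++ "__"

-- ===== PORT A =====
-- A's charlist, in A's order
def pvCharlist : List Char :=
  ['-', '|', '/', '(', ')', '\'', '=', '#', '*', '.', ':', '!', '+', '[', ']', ',', ' ']

def convert_to_coded_id (uncoded : String) (_type : Option String) (compart : Option String) : String :=
  let u1 := match _type with
    | some t => t ++ "_" ++ uncoded
    | none => uncoded
  let u2 := match compart with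
    | some cp => u1 ++ "_" ++ cp
    | none => u1
  pvCharlist.foldl (fun s c => PySem.Str.replace s (String.ofList [c]) (pvEnc c)) u2

-- ===== PORT B =====
-- B's banned set, built from the string literal in Source B
def pvBanned : PySem.Set Char := PySem.Set.ofList "-|/()'=#*.:!+[], ".toList

-- ''.join over the per-character generator is ported as one flatMap (exact: empty separator)
def convert_to_coded_id_alt (uncoded : String) (_type : Option String) (compart : Option String) : String :=
  let u1 := match _type with
    | some t => t ++ "_" ++ uncoded
    | none => uncoded
  let u2 := match compart with
    | some cp => u1 ++ "_" ++ cp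
    | none => u1
  String.ofList (u2.toList.flatMap (fun c => if c ∈ pvBanned then (pvEnc c).toList else [c]))

-- ===== PRECONDITION & SPEC =====
def Spec_convert_to_coded_id (uncoded : String) (_type : Option String) (compart : Option String) (out : String) : Prop := out = convert_to_coded_id_alt uncoded _type compart
instance (uncoded : String) (_type : Option String) (compart : Option String) (out : String) : Decidable (Spec_convert_to_coded_id uncoded _type compart out) := by unfold Spec_convert_to_coded_id; infer_instance

-- ===== CLAIM (what is proved, stated in full; the proofs are below) =====
def Claim_equal_convert_to_coded_id : Prop := ∀ (uncoded : String) (_type : Option String) (compart : Option String), Dom_convert_to_coded_id uncoded _type compart → Spec_convert_to_coded_id uncoded _type compart (convert_to_coded_id uncoded _type compart)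

-- ===== LEMMAS AND PROOFS =====

-- the char-level substitution B performs on p-banned characters
def pvSub (p : List Char) (x : Char) : List Char :=
  if x ∈ p then (pvEnc x).toList else [x]

-- replace.go with a single-character pattern is the obvious per-character substitution
theorem pv_go_single (c : Char) (new : List Char) :
    ∀ (l : List Char) (fuel : Nat) (acc : List Char), l.length ≤ fuel →
    PySem.Chars.replace.go [c] new fuel l acc
      = acc.reverse ++ l.flatMap (fun x => if x = c then new else [x]) := by
  intro l
  induction l with
  | nil =>
    intro fuel acc _
    cases fuel <;> simp [PySem.Chars.replace.go]
  | cons a t ih =>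
    intro fuel acc hfuel
    cases fuel with
    | zero => simp at hfuel
    | succ n =>
      by_cases hac : a = c
      · rw [show PySem.Chars.replace.go [c] new (n + 1) (a :: t) acc
              = PySem.Chars.replace.go [c] new n t (new.reverse ++ acc) from by
            simp [PySem.Chars.replace.go, List.isPrefixOf, hac]]
        rw [ih n (new.reverse ++ acc) (Nat.le_of_succ_le_succ (by simpa using hfuel))]
        simp [hac]
      · rw [show PySem.Chars.replace.go [c] new (n + 1) (a :: t) acc
              = PySem.Chars.replace.go [c] new n t (a :: acc) from by
            simp [PySem.Chars.replace.go, List.isPrefixOf, Ne.symm hac]]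
        rw [ih n (a :: acc) (Nat.le_of_succ_le_succ (by simpa using hfuel))]
        simp [hac]

set_option maxRecDepth 4000 in
theorem pv_replace_single (c : Char) (new : List Char) (l : List Char) :
    PySem.Chars.replace l [c] new = l.flatMap (fun x => if x = c then new else [x]) := by
  have h := pv_go_single c new l l.length [] (le_refl _)
  simpa [PySem.Chars.replace] using h

-- no character of pvCharlist occurs in the encoding of a character of pvCharlist
theorem pv_enc_fresh_bool :
    (pvCharlist.all (fun x => pvCharlist.all (fun c => !((pvEnc x).toList.contains c)))) = true := by
  rfl

theorem pv_enc_fresh : ∀ x ∈ pvCharlist, ∀ c ∈ pvCharlist, c ∉ (pvEnc x).toList := by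
  intro x hx c hc
  have hb := pv_enc_fresh_bool
  rw [List.all_eq_true] at hb
  have h1 := hb x hx
  rw [List.all_eq_true] at h1
  have h2 := h1 c hc
  simpa [List.contains_iff_mem] using h2

-- flatMap of a list all of whose elements are fixed by h is the identity
theorem pv_flatMap_fix (h : Char → List Char) (l : List Char) (hh : ∀ y ∈ l, h y = [y]) :
    l.flatMap h = l := by
  induction l with
  | nil => rfl
  | cons a t ih => simp_all

-- one replace step extends the processed-prefix substitution by one character
theorem pv_step (p : List Char) (c : Char)
    (hp : ∀ x ∈ p, c ∉ (pvEnc x).toList) (l : List Char) :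
    PySem.Chars.replace (l.flatMap (pvSub p)) [c] (pvEnc c).toList
      = l.flatMap (pvSub (p ++ [c])) := by
  rw [pv_replace_single, List.flatMap_assoc]
  refine List.flatMap_congr (fun x _ => ?_)
  unfold pvSub
  by_cases hxp : x ∈ p
  · have hx : x ∈ p ++ [c] := List.mem_append_left _ hxp
    rw [if_pos hxp, if_pos hx]
    exact pv_flatMap_fix _ _ (fun y hy => by
      rw [if_neg]; intro he; exact hp x hxp (he ▸ hy))
  · by_cases hxc : x = c
    · subst hxc
      rw [if_neg hxp, if_pos (by simp)]
      simp
    · rw [if_neg hxp, if_neg (by simp [hxp, hxc])]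
      simp [hxc]

-- folding the single-char replaces over cs, having already processed p
theorem pv_fold (cs : List Char) :
    ∀ (p : List Char), (∀ c ∈ cs, ∀ x ∈ p, c ∉ (pvEnc x).toList) →
    (∀ c ∈ cs, ∀ x ∈ cs, c ∉ (pvEnc x).toList) →
    ∀ l : List Char,
    cs.foldl (fun s c => PySem.Chars.replace s [c] (pvEnc c).toList) (l.flatMap (pvSub p))
      = l.flatMap (pvSub (p ++ cs)) := by
  induction cs with
  | nil => intro p _ _ l; simp
  | cons c cs ih =>
    intro p hpc hcc l
    simp only [List.foldl_cons]
    rw [pv_step p c (hpc c (by simp)) l]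
    rw [ih (p ++ [c])
      (fun c' hc' x hx => by
        rcases List.mem_append.mp hx with h | h
        · exact hpc c' (by simp [hc']) x h
        · simp only [List.mem_singleton] at h
          exact h ▸ hcc c' (by simp [hc']) c (by simp))
      (fun c' hc' x hx => hcc c' (by simp [hc']) x (by simp [hx])) l]
    simp

-- A's String-level fold, moved to char lists
theorem pv_fold_str (cs : List Char) :
    ∀ s : String,
    (cs.foldl (fun s c => PySem.Str.replace s (String.ofList [c]) (pvEnc c)) s).toList
      = cs.foldl (fun l c => PySem.Chars.replace l [c] (pvEnc c).toList) s.toList := by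
  induction cs with
  | nil => intro s; rfl
  | cons c cs ih =>
    intro s
    rw [List.foldl_cons, List.foldl_cons, ih, PySem.Str.toList_replace]
    simp

-- B's banned set holds exactly A's charlist characters
theorem pv_banned_eq : ∀ x : Char, (x ∈ pvBanned) = (x ∈ pvCharlist) := by
  intro x
  simp only [pvBanned, pvCharlist, PySem.Set.ofList]
  rfl

-- ===== VERDICT (by name: the statement is the Claim_ definition above) =====
-- the whole-string statement: A's 17-fold replace equals B's single pass
theorem pv_main (s : String) :
    (pvCharlist.foldl (fun s c => PySem.Str.replace s (String.ofList [c]) (pvEnc c)) s).toList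
      = (String.ofList (s.toList.flatMap
          (fun c => if c ∈ pvBanned then (pvEnc c).toList else [c]))).toList := by
  rw [pv_fold_str]
  have h0 : s.toList.flatMap (pvSub []) = s.toList :=
    pv_flatMap_fix _ _ (fun y _ => by simp [pvSub])
  conv_lhs => rw [← h0]
  rw [pv_fold pvCharlist [] (by simp) (fun c hc x hx => pv_enc_fresh x hx c hc) s.toList]
  simp only [List.nil_append, String.toList_ofList]
  exact List.flatMap_congr (fun x _ => by simp [pvSub, pv_banned_eq])

-- ===== VERDICT (by name: the statement is the Claim_ definition above) =====
theorem convert_to_coded_id_spec : Claim_equal_convert_to_coded_id := by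
  unfold Claim_equal_convert_to_coded_id
  intro uncoded _type compart _
  unfold Spec_convert_to_coded_id convert_to_coded_id convert_to_coded_id_alt
  exact String.ext (pv_main _)
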